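-- pv_equiv track=rewrite | github.com/younes-nb/sparse-matrix | venv/Model.py | transpose
-- ===== SOURCE A (Python) =====
-- def transpose(A=list):
--     B = [0 for i in range(len(A))]
--
--     if A != []:
--         originRowB = 0
--         originColumnB = 0
--
--         for item in A:
--
--             if item[0] > originColumnB:
--                 originColumnB = item[0]
--
--             if item[1] > originRowB:
--                 originRowB = item[1]
--
--         originRowB += 1
--         originColumnB += 1
--         rowSize = [0 for i in range(originRowB)]
--
--         for i in range(len(A)):
--             rowSize[A[i][1]] += 1
--
--         startOfRow = [0]
--
--         for i in range(1, originRowB):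
--             startOfRow.append(startOfRow[i - 1] + rowSize[i - 1])
--
--         for i in range(len(A)):
--             x = startOfRow[A[i][1]]
--             B[x] = (A[i][1], A[i][0], A[i][2])
--             startOfRow[A[i][1]] += 1
--
--         return B
-- ===== SOURCE B (Python) =====
-- def transpose(A=list):
--     rows = sorted(set(item[1] for item in A))
--     return [(item[1], item[0], item[2]) for r in rows for item in A if item[1] == r]
-- ===== Notes on version B (the rewrite author's own statement) =====
-- stated objective: simpler
-- what changed: Replaces the counting-sort machinery (max scan, count array, prefix sums, placement into a preallocated slot array) by one comprehension: iterate the sorted distinct row indices and emit each row's swapped triples in input order.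
-- outside the precondition, e.g. on transpose([]): A returns None, B returns []; on transpose([(0, 1, 1), (0, -1, 2)]): A returns [(1, 0, 1), (-1, 0, 2)], B returns [(-1, 0, 2), (1, 0, 1)]
import Mathlib
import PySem

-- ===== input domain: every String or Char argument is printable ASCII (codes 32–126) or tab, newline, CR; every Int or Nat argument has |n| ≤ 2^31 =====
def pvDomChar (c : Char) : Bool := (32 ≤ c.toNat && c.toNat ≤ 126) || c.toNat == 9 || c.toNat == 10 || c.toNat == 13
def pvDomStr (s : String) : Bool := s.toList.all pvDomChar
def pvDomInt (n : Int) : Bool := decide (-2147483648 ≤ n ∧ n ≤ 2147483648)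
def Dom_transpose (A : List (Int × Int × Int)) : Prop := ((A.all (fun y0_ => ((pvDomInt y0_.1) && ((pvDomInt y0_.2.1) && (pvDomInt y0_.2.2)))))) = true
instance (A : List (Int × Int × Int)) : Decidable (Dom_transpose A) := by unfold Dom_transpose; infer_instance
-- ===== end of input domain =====

-- B replaces A's count/prefix-sum/placement counting sort by one comprehension: the distinct row
-- indices in increasing order, each followed by its swapped triples in input order (objective: simpler).

-- ===== PORT A =====
-- Python 'l[i] += 1' on a list of ints (out-of-range i raises IndexError in Python → outside Pre_; pySetD/pyGetD then leave l unchanged)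
def pyIncAt (l : List Int) (i : Int) : List Int :=
  PySem.List.pySetD l i (PySem.List.pyGetD l i 0 + 1)

def transpose (A : List (Int × Int × Int)) : List (Int × Int × Int) :=
  -- B = [0 for i in range(len(A))]: Python fills with the int 0; under Pre_ every cell is
  -- overwritten before being returned, so the placeholder (0,0,0) stands for Python's 0
  let B := (PySem.List.pyRange 0 (PySem.List.len A) 1).map (fun _ => ((0:Int), (0:Int), (0:Int)))
  if A = [] then B   -- Python falls through and returns None here (outside Pre_); B is [] then
  else
    let oc := A.foldl (fun (acc : Int × Int) item =>
      let originColumnB := if item.1 > acc.2 then item.1 else acc.2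
      let originRowB := if item.2.1 > acc.1 then item.2.1 else acc.1
      (originRowB, originColumnB)) (0, 0)
    let originRowB := oc.1 + 1
    let rowSize0 := (PySem.List.pyRange 0 originRowB 1).map (fun _ => (0:Int))
    let rowSize := (PySem.List.pyRange 0 (PySem.List.len A) 1).foldl
      (fun rs i => pyIncAt rs (PySem.List.pyGetD A i (0,0,0)).2.1) rowSize0
    let startOfRow := (PySem.List.pyRange 1 originRowB 1).foldl
      (fun s i => s ++ [PySem.List.pyGetD s (i-1) 0 + PySem.List.pyGetD rowSize (i-1) 0]) [(0:Int)]
    let res := (PySem.List.pyRange 0 (PySem.List.len A) 1).foldl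
      (fun (st : List (Int × Int × Int) × List Int) i =>
        let item := PySem.List.pyGetD A i (0,0,0)
        let x := PySem.List.pyGetD st.2 item.2.1 0
        (PySem.List.pySetD st.1 x (item.2.1, item.1, item.2.2),
         PySem.List.pySetD st.2 item.2.1 (x + 1))) (B, startOfRow)
    res.1

-- ===== PORT B =====
def transpose_alt (A : List (Int × Int × Int)) : List (Int × Int × Int) :=
  let rows := PySem.List.sorted (PySem.Set.ofList (A.map (fun item => item.2.1))) (fun r => r) false
  rows.flatMap (fun r =>
    (A.filter (fun item => item.2.1 == r)).map (fun item => (item.2.1, item.1, item.2.2)))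

-- ===== PRECONDITION & SPEC =====
-- Pre_ keeps the natural sparse-matrix domain: a nonempty list of triples with nonnegative row
-- index item[1]. Excluded although A still returns there: the empty list (A falls through and
-- returns None, not a list) and negative rows within wraparound range (A's Python list indexing
-- wraps around, an accident of the counting-sort implementation); on other negative rows A raises IndexError.
def Pre_transpose (A : List (Int × Int × Int)) : Prop :=
  A ≠ [] ∧ ∀ item ∈ A, 0 ≤ item.2.1
instance (A : List (Int × Int × Int)) : Decidable (Pre_transpose A) := by unfold Pre_transpose; infer_instance
def pvWitness_transpose : (List (Int × Int × Int)) := [(2, 0, 5), (0, 1, 7), (1, 0, 3)]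

def Spec_transpose (A : List (Int × Int × Int)) (out : List (Int × Int × Int)) : Prop := out = transpose_alt A
instance (A : List (Int × Int × Int)) (out : List (Int × Int × Int)) : Decidable (Spec_transpose A out) := by unfold Spec_transpose; infer_instance

-- ===== CLAIM (what is proved, stated in full; the proofs are below) =====
def Claim_equal_transpose : Prop := ∀ (A : List (Int × Int × Int)), Dom_transpose A → Pre_transpose A → Spec_transpose A (transpose A)

-- ===== LEMMAS AND PROOFS =====

-- proof-side abbreviations
def pvSwap (it : Int × Int × Int) : Int × Int × Int := (it.2.1, it.1, it.2.2)
def pvCnt (P : List (Int × Int × Int)) (r : Int) : Nat := P.countP (fun it => it.2.1 == r)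
def pvCLT (A : List (Int × Int × Int)) (r : Int) : Nat := A.countP (fun it => decide (it.2.1 < r))
def pvGrp (P : List (Int × Int × Int)) (r : Int) : List (Int × Int × Int) :=
  (P.filter (fun it => it.2.1 == r)).map pvSwap
-- the canonical answer: rows 0..R-1 in order, each row's items in input order, swapped
def pvC (A : List (Int × Int × Int)) (R : Int) : List (Int × Int × Int) :=
  (PySem.List.pyRange 0 R 1).flatMap (fun r => pvGrp A r)
-- the B-array after the placement loop has processed prefix P
def pvGP (A P : List (Int × Int × Int)) (r : Int) : List (Int × Int × Int) :=
  pvGrp P r ++ List.replicate (pvCnt A r - pvCnt P r) ((0:Int), (0:Int), (0:Int))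
def pvBF (A P : List (Int × Int × Int)) (R : Int) : List (Int × Int × Int) :=
  (PySem.List.pyRange 0 R 1).flatMap (pvGP A P)
def pvSF (A P : List (Int × Int × Int)) (R : Int) : List Int :=
  (PySem.List.pyRange 0 R 1).map (fun r => ((pvCLT A r : Int) + (pvCnt P r : Int)))
def pvMaxRow (A : List (Int × Int × Int)) : Int :=
  (A.foldl (fun (acc : Int × Int) item =>
      let originColumnB := if item.1 > acc.2 then item.1 else acc.2
      let originRowB := if item.2.1 > acc.1 then item.2.1 else acc.1
      (originRowB, originColumnB)) (0, 0)).1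

theorem maxRow_foldl_le (A : List (Int × Int × Int)) : ∀ acc : Int × Int,
    acc.1 ≤ (A.foldl (fun (acc : Int × Int) item =>
      let originColumnB := if item.1 > acc.2 then item.1 else acc.2
      let originRowB := if item.2.1 > acc.1 then item.2.1 else acc.1
      (originRowB, originColumnB)) acc).1 := by
  induction A with
  | nil => intro acc; simp
  | cons a A ih =>
    intro acc
    rw [List.foldl_cons]
    refine le_trans ?_ (ih _)
    change acc.1 ≤ (if a.2.1 > acc.1 then a.2.1 else acc.1)
    split_ifs <;> omega

theorem le_maxRow_aux (A : List (Int × Int × Int)) : ∀ acc : Int × Int, ∀ it ∈ A,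
    it.2.1 ≤ (A.foldl (fun (acc : Int × Int) item =>
      let originColumnB := if item.1 > acc.2 then item.1 else acc.2
      let originRowB := if item.2.1 > acc.1 then item.2.1 else acc.1
      (originRowB, originColumnB)) acc).1 := by
  induction A with
  | nil => intro acc it h; simp at h
  | cons a A ih =>
    intro acc it h
    rw [List.foldl_cons]
    rcases List.mem_cons.1 h with h | h
    · subst h
      refine le_trans ?_ (maxRow_foldl_le A _)
      change it.2.1 ≤ (if it.2.1 > acc.1 then it.2.1 else acc.1)
      split_ifs <;> omega
    · exact ih _ it h

theorem maxRow_nonneg (A : List (Int × Int × Int)) : 0 ≤ pvMaxRow A :=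
  maxRow_foldl_le A (0, 0)

theorem le_maxRow (A : List (Int × Int × Int)) : ∀ it ∈ A, it.2.1 ≤ pvMaxRow A := by
  unfold pvMaxRow
  exact le_maxRow_aux A (0, 0)

theorem cnt_append (P Q : List (Int × Int × Int)) (r : Int) :
    pvCnt (P ++ Q) r = pvCnt P r + pvCnt Q r := by
  simp [pvCnt, List.countP_append]

theorem cnt_singleton (a : Int × Int × Int) (r : Int) :
    pvCnt [a] r = if a.2.1 = r then 1 else 0 := by
  simp [pvCnt, List.countP_cons]

theorem cLT_succ (A : List (Int × Int × Int)) (r : Int) :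
    pvCLT A (r + 1) = pvCLT A r + pvCnt A r := by
  induction A with
  | nil => simp [pvCLT, pvCnt]
  | cons a A ih =>
    simp only [pvCLT, pvCnt, List.countP_cons] at ih ⊢
    rcases lt_trichotomy a.2.1 r with h | h | h
    · rw [if_pos (show (decide (a.2.1 < r + 1)) = true by simp only [decide_eq_true_eq]; omega),
          if_pos (show (decide (a.2.1 < r)) = true by simp only [decide_eq_true_eq]; omega),
          if_neg (show ¬ ((a.2.1 == r) = true) by simp only [beq_iff_eq]; omega)]
      omega
    · rw [if_pos (show (decide (a.2.1 < r + 1)) = true by simp only [decide_eq_true_eq]; omega),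
          if_neg (show ¬ ((decide (a.2.1 < r)) = true) by simp only [decide_eq_true_eq]; omega),
          if_pos (show ((a.2.1 == r) = true) by simp only [beq_iff_eq]; omega)]
      omega
    · rw [if_neg (show ¬ ((decide (a.2.1 < r + 1)) = true) by simp only [decide_eq_true_eq]; omega),
          if_neg (show ¬ ((decide (a.2.1 < r)) = true) by simp only [decide_eq_true_eq]; omega),
          if_neg (show ¬ ((a.2.1 == r) = true) by simp only [beq_iff_eq]; omega)]
      omega

theorem cLT_zero (A : List (Int × Int × Int)) (h : ∀ it ∈ A, 0 ≤ it.2.1) : pvCLT A 0 = 0 := by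
  simp only [pvCLT, List.countP_eq_zero]
  intro a ha
  simp only [decide_eq_true_eq]
  have := h a ha
  omega

theorem cLT_full (A : List (Int × Int × Int)) (R : Int) (hlt : ∀ it ∈ A, it.2.1 < R) :
    pvCLT A R = A.length := by
  simp only [pvCLT]
  rw [List.countP_eq_length]
  intro a ha
  simp [hlt a ha]

theorem sum_cnt_nat (A : List (Int × Int × Int)) (h : ∀ it ∈ A, 0 ≤ it.2.1) (k : Nat) :
    (((PySem.List.pyRange 0 (k : Int) 1).map (fun r => pvCnt A r)).sum) = pvCLT A (k : Int) := by
  induction k with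
  | zero => simp [PySem.List.pyRange_one_eq_nil, cLT_zero A h]
  | succ k ih =>
    have hstep : PySem.List.pyRange 0 ((k : Int) + 1) 1
        = PySem.List.pyRange 0 (k : Int) 1 ++ [(k : Int)] :=
      PySem.List.pyRange_one_succ_right (show (0:Int) ≤ (k : Int) by omega)
    push_cast
    rw [hstep, List.map_append, List.sum_append, ih]
    simp [cLT_succ]

theorem sum_cnt (A : List (Int × Int × Int)) (h : ∀ it ∈ A, 0 ≤ it.2.1) (b : Int) (hb : 0 ≤ b) :
    (((PySem.List.pyRange 0 b 1).map (fun r => pvCnt A r)).sum) = pvCLT A b := by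
  have hbn : b = ((b.toNat : Nat) : Int) := by omega
  rw [hbn]
  exact sum_cnt_nat A h b.toNat

theorem grp_length (P : List (Int × Int × Int)) (r : Int) : (pvGrp P r).length = pvCnt P r := by
  simp [pvGrp, pvCnt, List.countP_eq_length_filter]

theorem cnt_prefix_le (P Q : List (Int × Int × Int)) (r : Int) :
    pvCnt P r ≤ pvCnt (P ++ Q) r := by
  rw [cnt_append]; omega

theorem GP_length (A P Q : List (Int × Int × Int)) (hPQ : A = P ++ Q) (r : Int) :
    (pvGP A P r).length = pvCnt A r := by
  have hle : pvCnt P r ≤ pvCnt A r := hPQ ▸ cnt_prefix_le P Q r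
  simp only [pvGP, List.length_append, grp_length, List.length_replicate]
  omega

theorem BF_length_prefix (A P Q : List (Int × Int × Int)) (hPQ : A = P ++ Q)
    (h : ∀ it ∈ A, 0 ≤ it.2.1) (b : Int) (hb : 0 ≤ b) :
    ((PySem.List.pyRange 0 b 1).flatMap (pvGP A P)).length = pvCLT A b := by
  rw [List.length_flatMap]
  have hmap : (PySem.List.pyRange 0 b 1).map (fun r => (pvGP A P r).length)
      = (PySem.List.pyRange 0 b 1).map (fun r => pvCnt A r) :=
    List.map_congr_left (fun r _ => GP_length A P Q hPQ r)
  rw [hmap, sum_cnt A h b hb]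

theorem mapRange_set {α : Type} (f : Int → α) (v : α) (r R : Int) (h0 : 0 ≤ r) (hR : r < R) :
    ((PySem.List.pyRange 0 R 1).map f).set r.toNat v
      = (PySem.List.pyRange 0 R 1).map (fun x => if x = r then v else f x) := by
  apply List.ext_getElem
  · simp
  · intro k h1 h2
    rw [List.getElem_set]
    simp only [List.getElem_map, PySem.List.getElem_pyRange_one]
    by_cases he : r.toNat = k
    · simp [he, show ((k : Int)) = r by omega]
    · simp [he, show ¬ ((k : Int) = r) by omega]

theorem sF_get (A P : List (Int × Int × Int)) (R r : Int) (h0 : 0 ≤ r) (hR : r < R) :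
    PySem.List.pyGetD (pvSF A P R) r 0 = (pvCLT A r : Int) + (pvCnt P r : Int) := by
  unfold pvSF
  exact PySem.List.pyGetD_map_pyRange_of_nonneg _ R r 0 h0 hR

theorem grp_snoc_self (P : List (Int × Int × Int)) (a : Int × Int × Int) :
    pvGrp (P ++ [a]) a.2.1 = pvGrp P a.2.1 ++ [pvSwap a] := by
  simp [pvGrp, List.filter_append]

theorem grp_snoc_ne (P : List (Int × Int × Int)) (a : Int × Int × Int) (r : Int)
    (h : a.2.1 ≠ r) : pvGrp (P ++ [a]) r = pvGrp P r := by
  simp [pvGrp, List.filter_append, h]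

theorem cnt_snoc_self (P : List (Int × Int × Int)) (a : Int × Int × Int) :
    pvCnt (P ++ [a]) a.2.1 = pvCnt P a.2.1 + 1 := by
  rw [cnt_append, cnt_singleton]; simp

theorem cnt_snoc_ne (P : List (Int × Int × Int)) (a : Int × Int × Int) (r : Int)
    (h : a.2.1 ≠ r) : pvCnt (P ++ [a]) r = pvCnt P r := by
  rw [cnt_append, cnt_singleton]; simp [h]

theorem GP_snoc_ne (A P : List (Int × Int × Int)) (a : Int × Int × Int) (r : Int)
    (h : a.2.1 ≠ r) : pvGP A (P ++ [a]) r = pvGP A P r := by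
  simp [pvGP, grp_snoc_ne P a r h, cnt_snoc_ne P a r h]

theorem cnt_mid_lt (A P Q : List (Int × Int × Int)) (a : Int × Int × Int)
    (hPQ : A = P ++ a :: Q) : pvCnt P a.2.1 < pvCnt A a.2.1 := by
  subst hPQ
  have hsingle : a :: Q = [a] ++ Q := rfl
  rw [hsingle, ← List.append_assoc, cnt_append, cnt_append, cnt_singleton]
  simp
  omega

theorem flatMap_congr_mem {α β : Type} (L : List α) (g g' : α → List β)
    (h : ∀ x ∈ L, g x = g' x) : L.flatMap g = L.flatMap g' := by
  induction L with
  | nil => rfl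
  | cons a L ih =>
    rw [List.flatMap_cons, List.flatMap_cons, h a List.mem_cons_self,
      ih (fun x hx => h x (List.mem_cons_of_mem a hx))]

-- the placement-loop invariant: one step
theorem place_step (A P Q : List (Int × Int × Int)) (a : Int × Int × Int)
    (hPQ : A = P ++ a :: Q) (h : ∀ it ∈ A, 0 ≤ it.2.1) (R : Int)
    (hlt : ∀ it ∈ A, it.2.1 < R) :
    (PySem.List.pySetD (pvBF A P R)
        (PySem.List.pyGetD (pvSF A P R) a.2.1 0) (a.2.1, a.1, a.2.2),
     PySem.List.pySetD (pvSF A P R) a.2.1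
        (PySem.List.pyGetD (pvSF A P R) a.2.1 0 + 1))
      = (pvBF A (P ++ [a]) R, pvSF A (P ++ [a]) R) := by
  have haA : a ∈ A := by subst hPQ; simp
  have h0a : 0 ≤ a.2.1 := h a haA
  have hRa : a.2.1 < R := hlt a haA
  have hx : PySem.List.pyGetD (pvSF A P R) a.2.1 0
      = (pvCLT A a.2.1 : Int) + (pvCnt P a.2.1 : Int) := sF_get A P R a.2.1 h0a hRa
  have hcntlt : pvCnt P a.2.1 < pvCnt A a.2.1 := cnt_mid_lt A P Q a hPQ
  have hmid : (pvGP A P a.2.1).set (pvCnt P a.2.1) (a.2.1, a.1, a.2.2)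
      = pvGP A (P ++ [a]) a.2.1 := by
    unfold pvGP
    have hglen : (pvGrp P a.2.1).length = pvCnt P a.2.1 := grp_length P a.2.1
    rw [List.set_append_right _ _ (le_of_eq hglen)]
    rw [hglen, Nat.sub_self]
    have hm : pvCnt A a.2.1 - pvCnt P a.2.1
        = (pvCnt A a.2.1 - pvCnt (P ++ [a]) a.2.1) + 1 := by
      rw [cnt_snoc_self]; omega
    rw [hm, List.replicate_succ, List.set_cons_zero, grp_snoc_self]
    simp [pvSwap]
  have hF0 : (PySem.List.pyRange 0 a.2.1 1).flatMap (pvGP A P)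
      = (PySem.List.pyRange 0 a.2.1 1).flatMap (pvGP A (P ++ [a])) :=
    flatMap_congr_mem _ _ _ (fun r hr => (GP_snoc_ne A P a r (by
      have hr' := PySem.List.mem_pyRange_one.1 hr; omega)).symm)
  have hF1 : (PySem.List.pyRange (a.2.1 + 1) R 1).flatMap (pvGP A P)
      = (PySem.List.pyRange (a.2.1 + 1) R 1).flatMap (pvGP A (P ++ [a])) :=
    flatMap_congr_mem _ _ _ (fun r hr => (GP_snoc_ne A P a r (by
      have hr' := PySem.List.mem_pyRange_one.1 hr; omega)).symm)
  have hleft : PySem.List.pySetD (pvBF A P R)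
      (PySem.List.pyGetD (pvSF A P R) a.2.1 0) (a.2.1, a.1, a.2.2) = pvBF A (P ++ [a]) R := by
    rw [hx, PySem.List.pySetD_of_nonneg _ _
      (show (0:Int) ≤ (pvCLT A a.2.1 : Int) + (pvCnt P a.2.1 : Int) by omega)]
    have htn : ((pvCLT A a.2.1 : Int) + (pvCnt P a.2.1 : Int)).toNat
        = pvCLT A a.2.1 + pvCnt P a.2.1 := by omega
    rw [htn]
    have hsplit : PySem.List.pyRange 0 R 1
        = PySem.List.pyRange 0 a.2.1 1 ++ PySem.List.pyRange a.2.1 R 1 :=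
      PySem.List.pyRange_one_append 0 a.2.1 R h0a (le_of_lt hRa)
    have hcons : PySem.List.pyRange a.2.1 R 1
        = a.2.1 :: PySem.List.pyRange (a.2.1 + 1) R 1 :=
      PySem.List.pyRange_one_cons hRa
    unfold pvBF
    rw [hsplit, hcons]
    simp only [List.flatMap_append, List.flatMap_cons]
    have hfront : ((PySem.List.pyRange 0 a.2.1 1).flatMap (pvGP A P)).length = pvCLT A a.2.1 :=
      BF_length_prefix A P (a :: Q) hPQ h a.2.1 h0a
    rw [← hfront, List.set_append_right _ _ (Nat.le_add_right _ _), Nat.add_sub_cancel_left]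
    rw [List.set_append_left _ _ (by rw [GP_length A P (a :: Q) hPQ]; exact hcntlt)]
    rw [hmid, hF0, hF1]
  have hright : PySem.List.pySetD (pvSF A P R) a.2.1
      (PySem.List.pyGetD (pvSF A P R) a.2.1 0 + 1) = pvSF A (P ++ [a]) R := by
    rw [hx, PySem.List.pySetD_of_nonneg _ _ h0a]
    unfold pvSF
    rw [mapRange_set _ _ _ _ h0a hRa]
    apply List.map_congr_left
    intro r hr
    by_cases he : r = a.2.1
    · subst he
      rw [if_pos rfl, cnt_snoc_self]
      push_cast
      ring
    · rw [if_neg he, cnt_snoc_ne P a r (fun hh => he hh.symm)]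
  exact Prod.ext hleft hright

theorem place_loop (A : List (Int × Int × Int)) (h : ∀ it ∈ A, 0 ≤ it.2.1) (R : Int)
    (hlt : ∀ it ∈ A, it.2.1 < R) :
    ∀ Q P, A = P ++ Q →
      Q.foldl (fun (st : List (Int × Int × Int) × List Int) item =>
        let x := PySem.List.pyGetD st.2 item.2.1 0
        (PySem.List.pySetD st.1 x (item.2.1, item.1, item.2.2),
         PySem.List.pySetD st.2 item.2.1 (x + 1))) (pvBF A P R, pvSF A P R)
        = (pvBF A A R, pvSF A A R) := by
  intro Q
  induction Q with
  | nil =>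
    intro P hPQ
    simp only [List.append_nil] at hPQ
    subst hPQ
    rfl
  | cons a Q ih =>
    intro P hPQ
    rw [List.foldl_cons]
    refine Eq.trans ?_ (ih (P ++ [a]) (by simp [hPQ]))
    congr 1
    exact place_step A P Q a hPQ h R hlt

theorem rowSize_loop (A : List (Int × Int × Int)) (h : ∀ it ∈ A, 0 ≤ it.2.1) (R : Int)
    (hlt : ∀ it ∈ A, it.2.1 < R) :
    ∀ Q P, A = P ++ Q →
      Q.foldl (fun rs item => pyIncAt rs item.2.1)
          ((PySem.List.pyRange 0 R 1).map (fun r => (pvCnt P r : Int)))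
        = (PySem.List.pyRange 0 R 1).map (fun r => (pvCnt A r : Int)) := by
  intro Q
  induction Q with
  | nil =>
    intro P hPQ
    simp only [List.append_nil] at hPQ
    subst hPQ
    rfl
  | cons a Q ih =>
    intro P hPQ
    have haA : a ∈ A := by subst hPQ; simp
    have h0a : 0 ≤ a.2.1 := h a haA
    have hRa : a.2.1 < R := hlt a haA
    rw [List.foldl_cons]
    have hstep : pyIncAt ((PySem.List.pyRange 0 R 1).map (fun r => (pvCnt P r : Int))) a.2.1
        = (PySem.List.pyRange 0 R 1).map (fun r => (pvCnt (P ++ [a]) r : Int)) := by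
      unfold pyIncAt
      rw [PySem.List.pyGetD_map_pyRange_of_nonneg _ R a.2.1 0 h0a hRa]
      rw [PySem.List.pySetD_of_nonneg _ _ h0a]
      rw [mapRange_set _ _ _ _ h0a hRa]
      apply List.map_congr_left
      intro r hr
      by_cases he : r = a.2.1
      · subst he
        rw [if_pos rfl, cnt_snoc_self]
        push_cast
        ring
      · rw [if_neg he, cnt_snoc_ne P a r (fun hh => he hh.symm)]
    refine Eq.trans ?_ (ih (P ++ [a]) (by simp [hPQ]))
    congr 1  -- the remaining init-state goal is closed from hstep by congr's assumption step

theorem startOfRow_loop_aux (A : List (Int × Int × Int)) (h : ∀ it ∈ A, 0 ≤ it.2.1) (R : Int) :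
    ∀ k : Nat, 1 + (k : Int) ≤ R →
    (PySem.List.pyRange 1 (1 + (k : Int)) 1).foldl
      (fun s i => s ++ [PySem.List.pyGetD s (i-1) 0
          + PySem.List.pyGetD ((PySem.List.pyRange 0 R 1).map (fun r => (pvCnt A r : Int))) (i-1) 0])
      [(0:Int)]
      = (PySem.List.pyRange 0 (1 + (k : Int)) 1).map (fun r => (pvCLT A r : Int)) := by
  intro k
  induction k with
  | zero =>
    intro _
    have h01 : PySem.List.pyRange 0 1 1 = [0] := by decide
    simp only [Nat.cast_zero, add_zero]
    rw [PySem.List.pyRange_one_eq_nil (le_refl 1), List.foldl_nil, h01]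
    simp [cLT_zero A h]
  | succ k ih =>
    intro hk
    have hk' : 1 + (k : Int) ≤ R := by push_cast at hk ⊢; omega
    have hcast : 1 + ((k + 1 : Nat) : Int) = (1 + (k : Int)) + 1 := by push_cast; ring
    rw [hcast]
    rw [PySem.List.pyRange_one_succ_right (show (1:Int) ≤ 1 + (k : Int) by omega)]
    rw [List.foldl_append, ih hk']
    rw [List.foldl_cons, List.foldl_nil]
    have hlen1 : (1 + (k : Int)) - 1 = (k : Int) := by ring
    have hg1 : PySem.List.pyGetD
        ((PySem.List.pyRange 0 (1 + (k : Int)) 1).map (fun r => (pvCLT A r : Int))) ((1 + (k : Int)) - 1) 0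
        = (pvCLT A (k : Int) : Int) := by
      rw [hlen1]
      exact PySem.List.pyGetD_map_pyRange_of_nonneg _ _ _ 0 (by omega) (by omega)
    have hg2 : PySem.List.pyGetD
        ((PySem.List.pyRange 0 R 1).map (fun r => (pvCnt A r : Int))) ((1 + (k : Int)) - 1) 0
        = (pvCnt A (k : Int) : Int) := by
      rw [hlen1]
      exact PySem.List.pyGetD_map_pyRange_of_nonneg _ _ _ 0 (by omega) (by push_cast at hk; omega)
    rw [hg1, hg2]
    rw [PySem.List.pyRange_one_succ_right (show (0:Int) ≤ 1 + (k : Int) by omega)]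
    rw [List.map_append]
    congr 1
    simp only [List.map_cons, List.map_nil]
    congr 1
    have h1k : (1 + (k : Int)) = (k : Int) + 1 := by ring
    rw [h1k, cLT_succ]
    push_cast
    ring

theorem startOfRow_loop (A : List (Int × Int × Int)) (h : ∀ it ∈ A, 0 ≤ it.2.1) (R : Int)
    (hR : 1 ≤ R) :
    (PySem.List.pyRange 1 R 1).foldl
      (fun s i => s ++ [PySem.List.pyGetD s (i-1) 0
          + PySem.List.pyGetD ((PySem.List.pyRange 0 R 1).map (fun r => (pvCnt A r : Int))) (i-1) 0])
      [(0:Int)]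
      = (PySem.List.pyRange 0 R 1).map (fun r => (pvCLT A r : Int)) := by
  have hRk : R = 1 + (((R - 1).toNat : Nat) : Int) := by omega
  rw [hRk]
  exact startOfRow_loop_aux A h _ (R - 1).toNat (by omega)

-- B-side: sorted distinct rows = the rows of 0..R-1 that occur in A
theorem rows_sorted_eq (A : List (Int × Int × Int)) (h : ∀ it ∈ A, 0 ≤ it.2.1) (R : Int)
    (hlt : ∀ it ∈ A, it.2.1 < R) :
    PySem.List.sorted (PySem.Set.ofList (A.map (fun item => item.2.1))) (fun r => r) false
      = (PySem.List.pyRange 0 R 1).filter (fun r => decide (∃ it ∈ A, it.2.1 = r)) := by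
  have hs1 : (PySem.List.sorted (PySem.Set.ofList (A.map (fun item => item.2.1))) (fun r => r) false).Pairwise (· < ·) :=
    PySem.List.sorted_ofList_pairwise_lt _
  have hs2 : ((PySem.List.pyRange 0 R 1).filter (fun r => decide (∃ it ∈ A, it.2.1 = r))).Pairwise ((· < ·) : Int → Int → Prop) :=
    List.Pairwise.sublist List.filter_sublist (PySem.List.pairwise_lt_pyRange_one 0 R)
  have hnd1 := hs1.imp (fun h => ne_of_lt h)
  have hnd2 := hs2.imp (fun h => ne_of_lt h)
  have hmem : ∀ x : Int,
      x ∈ PySem.List.sorted (PySem.Set.ofList (A.map (fun item => item.2.1))) (fun r => r) false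
      ↔ x ∈ (PySem.List.pyRange 0 R 1).filter (fun r => decide (∃ it ∈ A, it.2.1 = r)) := by
    intro x
    rw [PySem.List.mem_sorted, PySem.Set.mem_ofList, List.mem_filter, PySem.List.mem_pyRange_one]
    simp only [List.mem_map, decide_eq_true_eq]
    constructor
    · rintro ⟨it, hit, hx⟩
      refine ⟨⟨?_, ?_⟩, ⟨it, hit, hx⟩⟩
      · rw [← hx]; exact h it hit
      · rw [← hx]; exact hlt it hit
    · rintro ⟨_, ⟨it, hit, hx⟩⟩
      exact ⟨it, hit, hx⟩
  have hperm := (List.perm_ext_iff_of_nodup hnd1 hnd2).2 hmem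
  exact List.Perm.eq_of_pairwise (fun a b _ _ h1 h2 => le_antisymm h1 h2)
    (hs1.imp le_of_lt) (hs2.imp le_of_lt) hperm

theorem flatMap_filter_eq {α β : Type} (L : List α) (p : α → Bool) (g : α → List β)
    (h : ∀ x ∈ L, p x = false → g x = []) :
    (L.filter p).flatMap g = L.flatMap g := by
  induction L with
  | nil => simp
  | cons a L ih =>
    by_cases hp : p a
    · simp only [List.filter_cons, hp, if_true, List.flatMap_cons]
      rw [ih (fun x hx hfx => h x (List.mem_cons_of_mem a hx) hfx)]
    · have hpa : p a = false := by simpa using hp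
      simp only [List.filter_cons, hpa, Bool.false_eq_true, if_false, List.flatMap_cons]
      rw [h a List.mem_cons_self hpa]
      simp [ih (fun x hx hfx => h x (List.mem_cons_of_mem a hx) hfx)]

theorem transpose_alt_eq_C (A : List (Int × Int × Int)) (h : ∀ it ∈ A, 0 ≤ it.2.1) (R : Int)
    (hlt : ∀ it ∈ A, it.2.1 < R) : transpose_alt A = pvC A R := by
  unfold transpose_alt pvC
  rw [rows_sorted_eq A h R hlt]
  have hfun : ∀ r : Int, ((A.filter (fun item => item.2.1 == r)).map (fun item => (item.2.1, item.1, item.2.2)))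
      = pvGrp A r := by
    intro r; rfl
  simp only [hfun]
  apply flatMap_filter_eq
  intro r _ hr
  simp only [decide_eq_false_iff_not] at hr
  unfold pvGrp
  rw [List.filter_eq_nil_iff.2]
  · rfl
  · intro it hit
    simp only [beq_iff_eq]
    exact fun he => hr ⟨it, hit, he⟩

theorem mapRange_const {α : Type} (n : Int) (d : α) :
    (PySem.List.pyRange 0 n 1).map (fun _ => d) = List.replicate n.toNat d := by
  rw [List.eq_replicate_iff]
  constructor
  · simp [PySem.List.length_pyRange_one]
  · intro b hb
    rcases List.mem_map.1 hb with ⟨x, _, hx⟩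
    exact hx.symm

theorem flatMap_replicate {α β : Type} (L : List α) (f : α → Nat) (d : β) :
    L.flatMap (fun r => List.replicate (f r) d) = List.replicate ((L.map f).sum) d := by
  induction L with
  | nil => simp
  | cons a L ih =>
    rw [List.flatMap_cons, ih, List.map_cons, List.sum_cons, List.replicate_add]

theorem pvBF_nil (A : List (Int × Int × Int)) (h : ∀ it ∈ A, 0 ≤ it.2.1) (R : Int)
    (hlt : ∀ it ∈ A, it.2.1 < R) (hR : 0 ≤ R) :
    pvBF A [] R = List.replicate A.length ((0:Int), (0:Int), (0:Int)) := by
  unfold pvBF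
  have hfun : ∀ r : Int, pvGP A [] r = List.replicate (pvCnt A r) ((0:Int),(0:Int),(0:Int)) := by
    intro r
    simp [pvGP, pvGrp, pvCnt]
  rw [show (PySem.List.pyRange 0 R 1).flatMap (pvGP A [])
      = (PySem.List.pyRange 0 R 1).flatMap (fun r => List.replicate (pvCnt A r) ((0:Int),(0:Int),(0:Int)))
    from flatMap_congr_mem _ _ _ (fun r _ => hfun r)]
  rw [flatMap_replicate, sum_cnt A h R hR, cLT_full A R hlt]

theorem pvBF_self (A : List (Int × Int × Int)) (R : Int) : pvBF A A R = pvC A R := by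
  unfold pvBF pvC
  apply flatMap_congr_mem
  intro r _
  simp [pvGP]

-- ===== VERDICT (by name: the statement is the Claim_ definition above) =====
theorem transpose_spec : Claim_equal_transpose := by
  intro A _hdom hpre
  obtain ⟨hne, h0⟩ := hpre
  unfold Spec_transpose
  have hR0 := maxRow_nonneg A
  have hlt : ∀ it ∈ A, it.2.1 < pvMaxRow A + 1 := fun it hi => by
    have := le_maxRow A it hi; omega
  simp only [transpose]
  rw [if_neg hne]
  have hM : (A.foldl (fun (acc : Int × Int) item =>
      let originColumnB := if item.1 > acc.2 then item.1 else acc.2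
      let originRowB := if item.2.1 > acc.1 then item.2.1 else acc.1
      (originRowB, originColumnB)) (0, 0)).1 = pvMaxRow A := rfl
  rw [hM]
  rw [PySem.List.foldl_pyRange_zero_pyGetD A ((0:Int),(0:Int),(0:Int))
    (fun rs (item : Int × Int × Int) => pyIncAt rs item.2.1)]
  have e1b : ((PySem.List.pyRange 0 (pvMaxRow A + 1) 1).map (fun _ => (0:Int)))
      = ((PySem.List.pyRange 0 (pvMaxRow A + 1) 1).map (fun r => (pvCnt [] r : Int))) :=
    List.map_congr_left (fun r _ => by simp [pvCnt])
  rw [e1b]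
  rw [rowSize_loop A h0 (pvMaxRow A + 1) hlt A [] rfl]
  rw [startOfRow_loop A h0 (pvMaxRow A + 1) (by omega)]
  rw [PySem.List.foldl_pyRange_zero_pyGetD A ((0:Int),(0:Int),(0:Int))
    (fun (st : List (Int × Int × Int) × List Int) (item : Int × Int × Int) =>
      let x := PySem.List.pyGetD st.2 item.2.1 0
      (PySem.List.pySetD st.1 x (item.2.1, item.1, item.2.2),
       PySem.List.pySetD st.2 item.2.1 (x + 1)))]
  have eB : (PySem.List.pyRange 0 (PySem.List.len A) 1).map (fun _ => ((0:Int),(0:Int),(0:Int)))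
      = pvBF A [] (pvMaxRow A + 1) := by
    rw [mapRange_const, pvBF_nil A h0 _ hlt (by omega)]
    congr 1
  rw [eB]
  have eS : ((PySem.List.pyRange 0 (pvMaxRow A + 1) 1).map (fun r => (pvCLT A r : Int)))
      = pvSF A [] (pvMaxRow A + 1) := by
    unfold pvSF
    exact List.map_congr_left (fun r _ => by simp [pvCnt])
  rw [eS]
  rw [place_loop A h0 (pvMaxRow A + 1) hlt A [] rfl]
  show pvBF A A (pvMaxRow A + 1) = transpose_alt A
  rw [transpose_alt_eq_C A h0 (pvMaxRow A + 1) hlt, pvBF_self]
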